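-- pv_equiv track=rewrite | github.com/Durairaj005/PraticeWebDevelopment | EduAnalytics/backend/app/utils/grade_converter.py | get_grade_distribution_counts
-- ===== SOURCE A (Python) =====
-- def get_grade_distribution_counts(grades_list: list) -> dict:
--     """
--     Count distribution of grades
--
--     Args:
--         grades_list: List of grade strings
--
--     Returns:
--         Dictionary with counts: {'O': n, 'A+': n, ...}
--     """
--     distribution = {
--         'O': 0,
--         'A+': 0,
--         'A': 0,
--         'B+': 0,
--         'B': 0,
--         'C': 0,
--         'RA': 0
--     }
--
--     for grade in grades_list:
--         if grade and grade.upper() in distribution: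
--             distribution[grade.upper()] += 1
--
--     return distribution
-- ===== SOURCE B (Python) =====
-- def get_grade_distribution_counts(grades_list: list) -> dict:
--     """
--     Count distribution of grades.
--
--     Sort-then-scan: sort the uppercased non-empty grades, run-length scan the
--     sorted list into a runs table, then project the fixed ordered key tuple.
--     """
--     ups = sorted(g.upper() for g in grades_list if g)
--     runs = {}
--     i = 0
--     n = len(ups)
--     while i < n:
--         j = i + 1
--         while j < n and ups[j] == ups[i]:
--             j += 1
--         runs[ups[i]] = j - i
--         i = j
--     return {k: runs.get(k, 0) for k in ('O', 'A+', 'A', 'B+', 'B', 'C', 'RA')}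
-- ===== Notes on version B (the rewrite author's own statement) =====
-- stated objective: alternative
-- what changed: Replaces A's guarded dict-increment loop with a sort-then-scan algorithm: sort the uppercased non-empty grades, compute run lengths of equal adjacent elements in one scan, then project the fixed ordered key tuple onto the runs table (default 0).
import Mathlib
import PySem

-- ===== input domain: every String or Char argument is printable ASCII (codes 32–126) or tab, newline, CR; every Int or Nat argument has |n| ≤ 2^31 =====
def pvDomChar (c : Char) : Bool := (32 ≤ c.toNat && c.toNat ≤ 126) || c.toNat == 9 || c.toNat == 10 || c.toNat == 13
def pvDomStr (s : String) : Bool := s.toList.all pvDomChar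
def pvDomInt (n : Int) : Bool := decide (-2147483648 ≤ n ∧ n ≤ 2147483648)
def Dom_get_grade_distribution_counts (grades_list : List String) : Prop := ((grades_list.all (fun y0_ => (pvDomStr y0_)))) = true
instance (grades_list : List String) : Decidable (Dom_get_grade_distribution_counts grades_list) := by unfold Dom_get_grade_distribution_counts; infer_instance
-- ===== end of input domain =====

-- B replaces A's guarded dict-increment loop by sort-then-scan (sort the uppercased
-- non-empty grades, run-length scan the sorted list, project the fixed key list);
-- a different algorithm of similar cost, not claimed faster.


-- ===== PORT A =====
-- the loop body: 'if grade and grade.upper() in distribution: distribution[grade.upper()] += 1'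
def gdcStep (d : PySem.Dict String Int) (grade : String) : PySem.Dict String Int :=
  if grade ≠ "" ∧ d.contains (PySem.Str.upper grade) = true then
    d.modify (PySem.Str.upper grade) 0 (· + 1)
  else d

def get_grade_distribution_counts (grades_list : List String) : List (String × Int) :=
  let distribution : PySem.Dict String Int :=
    PySem.Dict.ofList [("O", 0), ("A+", 0), ("A", 0), ("B+", 0), ("B", 0), ("C", 0), ("RA", 0)]
  (grades_list.foldl gdcStep distribution).items

-- ===== PORT B =====
-- the two while loops: advance j over the run of elements equal to ups[i], record
-- runs[ups[i]] = j - i, continue at i = j; as structural recursion the run is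
-- takeWhile (== x) and the continuation point is dropWhile (== x)
def gdcRuns : List String → PySem.Dict String Int → PySem.Dict String Int
  | [], d => d
  | x :: xs, d =>
      gdcRuns (xs.dropWhile (fun y => y == x))
        (d.insert x (1 + ((xs.takeWhile (fun y => y == x)).length : Int)))
  termination_by l _ => l.length
  decreasing_by
    simp only [List.length_cons]
    exact Nat.lt_succ_of_le (List.length_dropWhile_le _ _)

def get_grade_distribution_counts_alt (grades_list : List String) : List (String × Int) :=
  let ups := PySem.List.sorted ((grades_list.filter (fun g => g != "")).map PySem.Str.upper) (fun s => s) false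
  let runs := gdcRuns ups PySem.Dict.empty
  ["O", "A+", "A", "B+", "B", "C", "RA"].map (fun k => (k, runs.getD k 0))

-- ===== PRECONDITION & SPEC =====
def Spec_get_grade_distribution_counts (grades_list : List String) (out : List (String × Int)) : Prop := out = get_grade_distribution_counts_alt grades_list
instance (grades_list : List String) (out : List (String × Int)) : Decidable (Spec_get_grade_distribution_counts grades_list out) := by unfold Spec_get_grade_distribution_counts; infer_instance

-- ===== CLAIM (what is proved, stated in full; the proofs are below) =====
def Claim_equal_get_grade_distribution_counts : Prop := ∀ (grades_list : List String), Dom_get_grade_distribution_counts grades_list → Spec_get_grade_distribution_counts grades_list (get_grade_distribution_counts grades_list)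

-- ===== LEMMAS AND PROOFS =====

-- A side: the loop never adds or removes keys
theorem gdc_keys_fold (l : List String) (d : PySem.Dict String Int) :
    (l.foldl gdcStep d).keys = d.keys := by
  induction l generalizing d with
  | nil => rfl
  | cons g l ih =>
    simp only [List.foldl_cons]
    rw [ih]
    unfold gdcStep
    split_ifs with h
    · rw [PySem.Dict.keys_modify, PySem.Dict.keys_insert_of_contains _ _ h.2]
    · rfl

-- A side: each key already present counts exactly the uppercased non-empty grades equal to it
theorem gdc_getD_fold (l : List String) (d : PySem.Dict String Int) (k : String)
    (hk : k ∈ d.keys) :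
    (l.foldl gdcStep d).getD k 0
      = d.getD k 0 + (((l.filter (fun g => g != "")).map PySem.Str.upper).count k : Int) := by
  induction l generalizing d hk with
  | nil => simp
  | cons g l ih =>
    simp only [List.foldl_cons]
    by_cases hg : g = ""
    · subst hg
      have : gdcStep d "" = d := by unfold gdcStep; simp
      rw [this, ih d hk]
      simp
    · by_cases hc : d.contains (PySem.Str.upper g) = true
      · have hstep : gdcStep d g = d.modify (PySem.Str.upper g) 0 (· + 1) := by
          unfold gdcStep; rw [if_pos ⟨hg, hc⟩]
        rw [hstep, ih _ ?_]
        · rw [PySem.Dict.getD_modify]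
          have hfil : (List.filter (fun g => g != "") (g :: l)) = g :: l.filter (fun g => g != "") := by
            simp [hg]
          rw [hfil]
          simp only [List.map_cons, List.count_cons]
          by_cases hku : k = PySem.Str.upper g
          · simp [hku]; ring
          · have : (PySem.Str.upper g == k) = false := by
              simp; exact fun h => hku h.symm
            simp [hku, this]
        · rw [PySem.Dict.keys_modify, PySem.Dict.keys_insert_of_contains _ _ hc]
          exact hk
      · have hstep : gdcStep d g = d := by
          unfold gdcStep
          rw [if_neg]
          rintro ⟨-, h2⟩; exact hc h2
        rw [hstep, ih d hk]
        have hfil : (List.filter (fun g => g != "") (g :: l)) = g :: l.filter (fun g => g != "") := by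
          simp [hg]
        rw [hfil]
        simp only [List.map_cons, List.count_cons]
        have hku : k ≠ PySem.Str.upper g := by
          intro h
          exact hc (((PySem.Dict.contains_iff_mem_keys d _)).mpr (h ▸ hk))
        have : (PySem.Str.upper g == k) = false := by
          simp; exact fun h => hku h.symm
        simp [this]

-- B side: a sorted list keeps equal elements adjacent, so the head's run is all of them
theorem gdc_head_not_mem_drop (x : String) (xs : List String)
    (hs : (x :: xs).Pairwise (· ≤ ·)) :
    x ∉ xs.dropWhile (fun y => y == x) := by
  intro hmem
  rcases List.pairwise_cons.mp hs with ⟨hxle, hxs⟩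
  have hsub : List.Sublist (xs.dropWhile (fun y => y == x)) xs := List.dropWhile_sublist _
  have hrest : (xs.dropWhile (fun y => y == x)).Pairwise (· ≤ ·) := hxs.sublist hsub
  cases hr : xs.dropWhile (fun y => y == x) with
  | nil => rw [hr] at hmem; exact absurd hmem (List.not_mem_nil)
  | cons y ys =>
    have hne : (y == x) = false := by
      have := List.head_dropWhile_not (fun y => y == x) (l := xs) (by rw [hr]; simp)
      simpa [hr] using this
    have hyx : y ≠ x := by simpa using hne
    have hylt : x < y := lt_of_le_of_ne (hxle y (hsub.mem (by rw [hr]; simp))) (Ne.symm hyx)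
    rw [hr] at hmem hrest
    rcases List.mem_cons.mp hmem with h | h
    · exact hyx h.symm
    · have : y ≤ x := (List.pairwise_cons.mp hrest).1 x h
      exact absurd this (not_le.mpr hylt)

-- B side: on a sorted list the runs table looks up to the count
theorem gdcRuns_getD (l : List String) (d : PySem.Dict String Int) (k : String)
    (hs : l.Pairwise (· ≤ ·)) :
    (gdcRuns l d).getD k 0 = if k ∈ l then (l.count k : Int) else d.getD k 0 := by
  induction l, d using gdcRuns.induct with
  | case1 d => simp [gdcRuns]
  | case2 x xs d ih =>
    rcases List.pairwise_cons.mp hs with ⟨hxle, hxs⟩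
    have hrest : (xs.dropWhile (fun y => y == x)).Pairwise (· ≤ ·) :=
      hxs.sublist (List.dropWhile_sublist _)
    have hnotdrop : x ∉ xs.dropWhile (fun y => y == x) := gdc_head_not_mem_drop x xs hs
    have htake : ∀ y ∈ xs.takeWhile (fun y => y == x), y = x := by
      intro y hy
      simpa using List.mem_takeWhile_imp hy
    have hsplit : xs = xs.takeWhile (fun y => y == x) ++ xs.dropWhile (fun y => y == x) :=
      (List.takeWhile_append_dropWhile).symm
    have hxscount : xs.count k
        = (xs.takeWhile (fun y => y == x)).count k + (xs.dropWhile (fun y => y == x)).count k := by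
      conv_lhs => rw [hsplit]
      rw [List.count_append]
    have hxsmem : k ∈ xs ↔ k ∈ xs.takeWhile (fun y => y == x) ∨ k ∈ xs.dropWhile (fun y => y == x) := by
      conv_lhs => rw [hsplit]
      exact List.mem_append
    rw [gdcRuns, ih hrest, PySem.Dict.getD_insert]
    by_cases hk : k ∈ xs.dropWhile (fun y => y == x)
    · have hkx : k ≠ x := fun h => hnotdrop (h ▸ hk)
      have hkl : k ∈ x :: xs := List.mem_cons_of_mem _ (hxsmem.mpr (Or.inr hk))
      rw [if_pos hk, if_pos hkl]
      have htc : (xs.takeWhile (fun y => y == x)).count k = 0 := by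
        rw [List.count_eq_zero]
        intro h; exact hkx (htake k h)
      have hcnt : (x :: xs).count k = (xs.dropWhile (fun y => y == x)).count k := by
        rw [List.count_cons, hxscount, htc, beq_eq_false_iff_ne.mpr (fun h => hkx h.symm)]
        simp
      rw [hcnt]
    · rw [if_neg hk]
      by_cases hkx : k = x
      · subst hkx
        rw [if_pos rfl, if_pos List.mem_cons_self]
        have h1 : (xs.takeWhile (fun y => y == k)).count k
            = (xs.takeWhile (fun y => y == k)).length := by
          rw [List.count_eq_length]
          intro b hb; exact (htake b hb).symm
        have h2 : (xs.dropWhile (fun y => y == k)).count k = 0 :=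
          List.count_eq_zero.mpr hnotdrop
        have hcnt : (k :: xs).count k = (xs.takeWhile (fun y => y == k)).length + 1 := by
          rw [List.count_cons, hxscount, h1, h2]
          simp
        rw [hcnt]
        push_cast
        ring
      · rw [if_neg hkx]
        have hkl : k ∉ x :: xs := by
          intro h
          rcases List.mem_cons.mp h with h | h
          · exact hkx h
          · rcases hxsmem.mp h with h | h
            · exact hkx (htake k h)
            · exact hk h
        rw [if_neg hkl]

-- ===== VERDICT (by name: the statement is the Claim_ definition above) =====
theorem get_grade_distribution_counts_spec : Claim_equal_get_grade_distribution_counts := by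
  intro l _
  unfold Spec_get_grade_distribution_counts
  unfold get_grade_distribution_counts get_grade_distribution_counts_alt
  set d0 : PySem.Dict String Int :=
    PySem.Dict.ofList [("O", 0), ("A+", 0), ("A", 0), ("B+", 0), ("B", 0), ("C", 0), ("RA", 0)] with hd0
  have hnodup : (l.foldl gdcStep d0).keys.Nodup := by
    rw [gdc_keys_fold]
    exact PySem.Dict.nodup_keys_ofList _
  rw [PySem.Dict.items_eq_map_keys _ hnodup 0, gdc_keys_fold]
  have hkeys : d0.keys = ["O", "A+", "A", "B+", "B", "C", "RA"] := by rw [hd0]; rfl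
  rw [hkeys]
  apply List.map_congr_left
  intro k hk
  have hk0 : k ∈ d0.keys := by rw [hkeys]; exact hk
  rw [gdc_getD_fold l d0 k hk0]
  have hz : d0.getD k 0 = 0 := by fin_cases hk <;> rfl
  rw [hz, zero_add]
  have hperm : (PySem.List.sorted ((l.filter (fun g => g != "")).map PySem.Str.upper) (fun s => s) false).Perm
      ((l.filter (fun g => g != "")).map PySem.Str.upper) :=
    PySem.List.sorted_perm _ _ _
  have hpair : (PySem.List.sorted ((l.filter (fun g => g != "")).map PySem.Str.upper) (fun s => s) false).Pairwise (· ≤ ·) := by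
    simpa using PySem.List.sorted_pairwise ((l.filter (fun g => g != "")).map PySem.Str.upper) (fun s => s)
  rw [gdcRuns_getD _ PySem.Dict.empty k hpair]
  by_cases hmem : k ∈ PySem.List.sorted ((l.filter (fun g => g != "")).map PySem.Str.upper) (fun s => s) false
  · rw [if_pos hmem, hperm.count_eq]
  · rw [if_neg hmem]
    have hcz : ((l.filter (fun g => g != "")).map PySem.Str.upper).count k = 0 := by
      rw [List.count_eq_zero]
      intro h; exact hmem (hperm.mem_iff.mpr h)
    rw [hcz]
    simp
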